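-- pv_equiv track=rewrite | github.com/23CSE362-edge-computing-2025-26-odd/capstone-project-12_powerrangers | Review-2/route_generator.py | find_routes_from_edge
-- ===== SOURCE A (Python) =====
-- edge_connections = {
--     # Horizontal edges (left to right)
--     "A_B": ["B_C", "B_E", "B_A"],
--     "B_C": ["C_F", "C_B"],
--     "D_E": ["E_F", "E_H", "E_B", "E_D"],
--     "E_F": ["F_I", "F_C", "F_E"],
--     "G_H": ["H_I", "H_E", "H_G"],
--     "H_I": ["I_F", "I_H"],
--
--     # Horizontal edges (right to left)
--     "B_A": ["A_D", "A_B"],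
--     "C_B": ["B_A", "B_E", "B_C"],
--     "E_D": ["D_A", "D_G", "D_E"],
--     "F_E": ["E_B", "E_D", "E_H", "E_F"],
--     "H_G": ["G_D", "G_H"],
--     "I_H": ["H_G", "H_E", "H_I"],
--
--     # Vertical edges (top to bottom)
--     "A_D": ["D_E", "D_G", "D_A"],
--     "D_G": ["G_H", "G_D"],
--     "B_E": ["E_D", "E_F", "E_H", "E_B"],
--     "E_H": ["H_G", "H_I", "H_E"],
--     "C_F": ["F_E", "F_I", "F_C"],
--     "F_I": ["I_H", "I_F"],
--
--     # Vertical edges (bottom to top)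
--     "D_A": ["A_B", "A_D"],
--     "G_D": ["D_A", "D_E", "D_G"],
--     "E_B": ["B_A", "B_C", "B_E"],
--     "H_E": ["E_B", "E_D", "E_F", "E_H"],
--     "F_C": ["C_B", "C_F"],
--     "I_F": ["F_C", "F_E", "F_I"],
-- }
--
-- boundary_edges = [
--     "A_B", "A_D",  # From A
--     "B_A", "B_C",  # From B
--     "C_B", "C_F",  # From C
--     "D_A", "D_G",  # From D
--     "F_C", "F_I",  # From F
--     "G_D", "G_H",  # From G
--     "H_G", "H_I",  # From H
--     "I_F", "I_H"   # From I
-- ]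
--
-- def find_routes_from_edge(start_edge, path=None, max_depth=6):
--     """
--     Recursively find all valid routes starting from start_edge.
--
--     Args:
--         start_edge: Starting SUMO edge (e.g., "A_B")
--         path: Current path (list of edges)
--         max_depth: Maximum route length
--
--     Returns:
--         List of valid routes (each route is a list of edge IDs)
--     """
--     if path is None:
--         path = [start_edge]
--     else:
--         path = path + [start_edge]
--
--     routes = []
--
--     # If we reach a boundary edge and path length > 1, save the route
--     if start_edge in boundary_edges and len(path) > 1:
--         routes.append(path)
--
--     # Stop if maximum depth reached
--     if len(path) >= max_depth:
--         return routes
--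
--     # Explore connected edges (avoid cycles)
--     if start_edge in edge_connections:
--         for next_edge in edge_connections[start_edge]:
--             if next_edge not in path:  # Avoid revisiting edges
--                 routes.extend(find_routes_from_edge(next_edge, path, max_depth))
--
--     return routes
-- ===== SOURCE B (Python) =====
-- edge_connections = {
--     "A_B": ["B_C", "B_E", "B_A"],
--     "B_C": ["C_F", "C_B"],
--     "D_E": ["E_F", "E_H", "E_B", "E_D"],
--     "E_F": ["F_I", "F_C", "F_E"],
--     "G_H": ["H_I", "H_E", "H_G"],
--     "H_I": ["I_F", "I_H"],
--     "B_A": ["A_D", "A_B"],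
--     "C_B": ["B_A", "B_E", "B_C"],
--     "E_D": ["D_A", "D_G", "D_E"],
--     "F_E": ["E_B", "E_D", "E_H", "E_F"],
--     "H_G": ["G_D", "G_H"],
--     "I_H": ["H_G", "H_E", "H_I"],
--     "A_D": ["D_E", "D_G", "D_A"],
--     "D_G": ["G_H", "G_D"],
--     "B_E": ["E_D", "E_F", "E_H", "E_B"],
--     "E_H": ["H_G", "H_I", "H_E"],
--     "C_F": ["F_E", "F_I", "F_C"],
--     "F_I": ["I_H", "I_F"],
--     "D_A": ["A_B", "A_D"],
--     "G_D": ["D_A", "D_E", "D_G"],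
--     "E_B": ["B_A", "B_C", "B_E"],
--     "H_E": ["E_B", "E_D", "E_F", "E_H"],
--     "F_C": ["C_B", "C_F"],
--     "I_F": ["F_C", "F_E", "F_I"],
-- }
--
-- boundary_edges = [
--     "A_B", "A_D",
--     "B_A", "B_C",
--     "C_B", "C_F",
--     "D_A", "D_G",
--     "F_C", "F_I",
--     "G_D", "G_H",
--     "H_G", "H_I",
--     "I_F", "I_H",
-- ]
--
--
-- def find_routes_from_edge(start_edge, path=None, max_depth=6):
--     """Iterative pre-order DFS over an explicit stack of (edge, prefix) frames."""
--     routes = []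
--     stack = [(start_edge, [] if path is None else list(path))]
--     while stack:
--         edge, prefix = stack.pop()
--         cur = prefix + [edge]
--         if edge in boundary_edges and len(cur) > 1:
--             routes.append(cur)
--         if len(cur) < max_depth:
--             for nxt in reversed(edge_connections.get(edge, [])):
--                 if nxt not in cur:
--                     stack.append((nxt, cur))
--     return routes
-- ===== Notes on version B (the rewrite author's own statement) =====
-- stated objective: alternative
-- what changed: A's recursive DFS (recursion + routes.extend per child) is replaced by an iterative pre-order DFS over an explicit stack of (edge, prefix) frames, pushing surviving children in reverse so pops preserve A's route order.
import Mathlib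
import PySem

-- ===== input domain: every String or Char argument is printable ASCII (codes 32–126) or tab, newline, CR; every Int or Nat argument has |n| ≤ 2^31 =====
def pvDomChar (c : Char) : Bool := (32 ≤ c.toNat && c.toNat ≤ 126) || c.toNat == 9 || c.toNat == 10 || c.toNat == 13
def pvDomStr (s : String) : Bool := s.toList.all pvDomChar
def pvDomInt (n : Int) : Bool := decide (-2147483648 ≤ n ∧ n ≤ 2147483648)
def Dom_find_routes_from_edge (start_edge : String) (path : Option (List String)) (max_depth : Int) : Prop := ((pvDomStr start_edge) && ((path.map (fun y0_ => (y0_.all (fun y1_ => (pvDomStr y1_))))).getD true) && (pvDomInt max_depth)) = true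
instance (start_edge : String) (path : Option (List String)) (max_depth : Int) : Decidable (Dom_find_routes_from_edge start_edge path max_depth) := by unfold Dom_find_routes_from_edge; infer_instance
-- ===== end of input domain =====

-- B rewrites A's recursive DFS as an iterative pre-order DFS over an explicit stack (objective: alternative decomposition, same cost).

-- ===== PORT A =====
def edge_connections : PySem.Dict String (List String) := PySem.Dict.ofList [
  ("A_B", ["B_C", "B_E", "B_A"]),
  ("B_C", ["C_F", "C_B"]),
  ("D_E", ["E_F", "E_H", "E_B", "E_D"]),
  ("E_F", ["F_I", "F_C", "F_E"]),
  ("G_H", ["H_I", "H_E", "H_G"]),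
  ("H_I", ["I_F", "I_H"]),
  ("B_A", ["A_D", "A_B"]),
  ("C_B", ["B_A", "B_E", "B_C"]),
  ("E_D", ["D_A", "D_G", "D_E"]),
  ("F_E", ["E_B", "E_D", "E_H", "E_F"]),
  ("H_G", ["G_D", "G_H"]),
  ("I_H", ["H_G", "H_E", "H_I"]),
  ("A_D", ["D_E", "D_G", "D_A"]),
  ("D_G", ["G_H", "G_D"]),
  ("B_E", ["E_D", "E_F", "E_H", "E_B"]),
  ("E_H", ["H_G", "H_I", "H_E"]),
  ("C_F", ["F_E", "F_I", "F_C"]),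
  ("F_I", ["I_H", "I_F"]),
  ("D_A", ["A_B", "A_D"]),
  ("G_D", ["D_A", "D_E", "D_G"]),
  ("E_B", ["B_A", "B_C", "B_E"]),
  ("H_E", ["E_B", "E_D", "E_F", "E_H"]),
  ("F_C", ["C_B", "C_F"]),
  ("I_F", ["F_C", "F_E", "F_I"])]

def boundary_edges : List String :=
  ["A_B", "A_D", "B_A", "B_C", "C_B", "C_F", "D_A", "D_G",
   "F_C", "F_I", "G_D", "G_H", "H_G", "H_I", "I_F", "I_H"]

mutual
-- the body of find_routes_from_edge after the None handling: `path` is the caller's path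
def goA (start_edge : String) (path : List String) (max_depth : Int) : List (List String) :=
  let path' := path ++ [start_edge]
  let routes : List (List String) :=
    if boundary_edges.contains start_edge ∧ path'.length > 1 then [path'] else []
  if (path'.length : Int) ≥ max_depth then routes
  else
    match edge_connections.get? start_edge with
    | none => routes
    | some conns => loopA conns path' max_depth routes
termination_by ((max_depth - path.length).toNat, 0)
decreasing_by
  simp only [path', List.length_append, List.length_cons, List.length_nil] at *
  apply Prod.Lex.left; omega

-- the `for next_edge in edge_connections[start_edge]` loop, `routes` the accumulator
def loopA (conns : List String) (path' : List String) (max_depth : Int)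
    (routes : List (List String)) : List (List String) :=
  match conns with
  | [] => routes
  | c :: rest =>
      loopA rest path' max_depth
        (if c ∈ path' then routes else routes ++ goA c path' max_depth)
termination_by ((max_depth - path'.length).toNat, conns.length + 1)
decreasing_by
  all_goals apply Prod.Lex.right
  all_goals simp [List.length_cons]
end

def find_routes_from_edge (start_edge : String) (path : Option (List String)) (max_depth : Int) : List (List String) :=
  match path with
  | none => goA start_edge [] max_depth     -- path = [start_edge] = [] ++ [start_edge]
  | some p => goA start_edge p max_depth

-- ===== PORT B =====
-- lemma cited by loopB's decreasing_by: the reversed push loop, as a list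
theorem pushAll_eq (cs cur : List String) (st : List (String × List String)) :
    cs.reverse.foldl (fun st c => if c ∈ cur then st else (c, cur) :: st) st
      = (cs.filter (fun c => c ∉ cur)).map (fun c => (c, cur)) ++ st := by
  rw [List.foldl_reverse]
  induction cs with
  | nil => rfl
  | cons c rest ih => by_cases h : c ∈ cur <;> simp [List.foldr_cons, ih, h]

-- lemma cited by loopB's decreasing_by: every adjacency list has at most 4 entries
theorem children_len_le (e : String) : (edge_connections.getD e []).length ≤ 4 := by
  rcases h : edge_connections.get? e with _ | l
  · rw [PySem.Dict.getD_eq_get?_getD, h]; decide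
  · rw [PySem.Dict.getD_eq_get?_getD, h]
    have hm := PySem.Dict.mem_items_of_get?_eq_some _ h
    have hall : ∀ p ∈ edge_connections.items, (p.2).length ≤ 4 := by decide
    exact hall _ hm

def loopB (stack : List (String × List String)) (max_depth : Int)
    (routes : List (List String)) : List (List String) :=
  match stack with
  | [] => routes
  | (edge, pfx) :: rest =>
      let cur := pfx ++ [edge]
      let routes' := if boundary_edges.contains edge ∧ cur.length > 1 then routes ++ [cur] else routes
      if (cur.length : Int) < max_depth then
        loopB ((edge_connections.getD edge []).reverse.foldl
                 (fun st c => if c ∈ cur then st else (c, cur) :: st) rest)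
          max_depth routes'
      else
        loopB rest max_depth routes'
termination_by (stack.map (fun f => 5 ^ ((max_depth - f.2.length).toNat))).sum
decreasing_by
  · -- depth guard holds: pushed ≤ 4 children, each of strictly smaller weight
    rename_i hlt
    simp only [dite_eq_ite]
    rw [pushAll_eq, List.map_append, List.sum_append]
    simp only [List.map_map]
    have hk : 2 ≤ max_depth - (pfx.length : Int) := by
      simp only [cur, List.length_append, List.length_cons, List.length_nil] at hlt
      omega
    set k := (max_depth - (pfx.length : Int)).toNat with _hkdef
    have hk1 : 1 ≤ k := by omega
    have hcur : (max_depth - ((cur.length : Nat) : Int)).toNat = k - 1 := by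
      simp only [cur, List.length_append, List.length_cons, List.length_nil]
      omega
    have hconst : ∀ (l : List String),
        (l.map ((fun f : String × List String => 5 ^ ((max_depth - (f.2.length : Int)).toNat)) ∘ (fun c => (c, cur)))).sum
          = l.length * 5 ^ (k - 1) := by
      intro l
      induction l with
      | nil => simp
      | cons x xs ih =>
          simp only [List.map_cons, List.sum_cons, List.length_cons, Function.comp, ih, hcur]
          ring
    rw [hconst]
    have hle : ((edge_connections.getD edge []).filter (fun c => c ∉ cur)).length ≤ 4 :=
      le_trans (List.length_filter_le _ _) (children_len_le edge)
    have hpow : 0 < 5 ^ (k - 1) := Nat.pow_pos (by omega)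
    have h5 : 5 ^ k = 5 ^ (k - 1) * 5 := by
      rw [← Nat.pow_succ]; congr 1; omega
    simp only [List.map_cons, List.sum_cons]
    calc ((edge_connections.getD edge []).filter (fun c => c ∉ cur)).length * 5 ^ (k - 1)
          + (rest.map (fun f => 5 ^ ((max_depth - (f.2.length : Int)).toNat))).sum
        ≤ 4 * 5 ^ (k - 1) + (rest.map (fun f => 5 ^ ((max_depth - (f.2.length : Int)).toNat))).sum := by
          exact Nat.add_le_add_right (Nat.mul_le_mul_right _ hle) _
      _ < 5 ^ k + (rest.map (fun f => 5 ^ ((max_depth - (f.2.length : Int)).toNat))).sum := by omega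
  · -- depth guard fails: the popped frame's positive weight disappears
    simp only [List.map_cons, List.sum_cons]
    have hpow : 0 < 5 ^ ((max_depth - ((pfx.length : Nat) : Int)).toNat) := Nat.pow_pos (by omega)
    omega

def find_routes_from_edge_alt (start_edge : String) (path : Option (List String)) (max_depth : Int) : List (List String) :=
  loopB [(start_edge, match path with | none => [] | some p => p)] max_depth []

-- ===== PRECONDITION & SPEC =====
def Spec_find_routes_from_edge (start_edge : String) (path : Option (List String)) (max_depth : Int) (out : List (List String)) : Prop := out = find_routes_from_edge_alt start_edge path max_depth
instance (start_edge : String) (path : Option (List String)) (max_depth : Int) (out : List (List String)) : Decidable (Spec_find_routes_from_edge start_edge path max_depth out) := by unfold Spec_find_routes_from_edge; infer_instance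

-- ===== CLAIM (what is proved, stated in full; the proofs are below) =====
def Claim_equal_find_routes_from_edge : Prop := ∀ (start_edge : String) (path : Option (List String)) (max_depth : Int), Dom_find_routes_from_edge start_edge path max_depth → Spec_find_routes_from_edge start_edge path max_depth (find_routes_from_edge start_edge path max_depth)

-- ===== LEMMAS AND PROOFS =====

-- the inner for-loop of A is the flatMap over the not-yet-visited children
theorem loopA_eq (conns path' : List String) (max_depth : Int) (routes : List (List String)) :
    loopA conns path' max_depth routes
      = routes ++ (conns.filter (fun c => c ∉ path')).flatMap (fun c => goA c path' max_depth) := by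
  induction conns generalizing routes with
  | nil => simp [loopA]
  | cons c rest ih =>
      rw [loopA]
      by_cases h : c ∈ path' <;> simp [h, ih]

theorem goA_eq (e : String) (p : List String) (md : Int) :
    goA e p md
      = (if boundary_edges.contains e ∧ (p ++ [e]).length > 1 then [p ++ [e]] else [])
        ++ (if ((p ++ [e]).length : Int) < md then
              ((edge_connections.getD e []).filter (fun c => c ∉ p ++ [e])).flatMap
                (fun c => goA c (p ++ [e]) md)
            else []) := by
  rw [goA]
  by_cases hd : (((p ++ [e]).length : Nat) : Int) ≥ md
  · simp only [hd, if_true, if_neg (by omega : ¬ (((p ++ [e]).length : Nat) : Int) < md)]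
    simp
  · simp only [hd, if_false, if_pos (by omega : (((p ++ [e]).length : Nat) : Int) < md)]
    rcases h : edge_connections.get? e with _ | conns
    · rw [PySem.Dict.getD_eq_get?_getD, h]; simp
    · rw [PySem.Dict.getD_eq_get?_getD, h]
      simp only [loopA_eq, Option.getD_some]

theorem loopB_eq (stack : List (String × List String)) (md : Int) (routes : List (List String)) :
    loopB stack md routes = routes ++ stack.flatMap (fun f => goA f.1 f.2 md) := by
  fun_induction loopB stack md routes
  case case1 => simp
  case case2 routes edge pfx rest cur rts hlt ih =>
    have hc : cur = pfx ++ [edge] := rfl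
    have hr : rts = if boundary_edges.contains edge ∧ (pfx ++ [edge]).length > 1
        then routes ++ [pfx ++ [edge]] else routes := rfl
    have hlt' : (((pfx ++ [edge]).length : Nat) : Int) < md := hlt
    rw [hc, hr] at ih
    simp only [dite_eq_ite] at ih
    rw [hc, hr, ih, pushAll_eq, List.flatMap_append, List.flatMap_map,
        List.flatMap_cons, goA_eq edge pfx md, if_pos hlt']
    split_ifs <;> simp
  case case3 routes edge pfx rest cur rts hlt ih =>
    have hr : rts = if boundary_edges.contains edge ∧ (pfx ++ [edge]).length > 1
        then routes ++ [pfx ++ [edge]] else routes := rfl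
    have hlt' : ¬ (((pfx ++ [edge]).length : Nat) : Int) < md := hlt
    rw [hr] at ih
    rw [hr, ih, List.flatMap_cons, goA_eq edge pfx md, if_neg hlt']
    split_ifs <;> simp

-- ===== VERDICT (by name: the statement is the Claim_ definition above) =====
theorem find_routes_from_edge_spec : Claim_equal_find_routes_from_edge := by
  intro start_edge path max_depth _
  unfold Spec_find_routes_from_edge find_routes_from_edge find_routes_from_edge_alt
  rw [loopB_eq]
  cases path <;> simp
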